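-- pv_equiv track=rewrite | github.com/Suryakiran-Santhosh/Algorithms_Practice | correctCapitalization.py | correctCapitalization
-- ===== SOURCE A (Python) =====
-- def correctCapitalization(s: str) -> bool:
--     if s == "":
--         return True
--
--     # 4 cases: 1.) all caps, 2.) first leter cap, 3.) no letters caps, 4.) improper capitalization
--     firstLetter = False
--     capCounter = 0
--
--     if s[0].isupper():
--         firstLetter = True
--         capCounter += 1
--
--     for i in range(1, len(s), 1):
--         if s[i].isupper():
--             capCounter += 1
--
--     if (capCounter == 1 and firstLetter) or (capCounter == 0) or (capCounter == len(s)):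
--         return True
--     else:
--         return False
--
--     """
--     Time Complexity: O(n) bc each letter is checked once
--     Space Complexity: O(1) bc only used two variables a boolean and an int which is ne gligible space
--     """
-- ===== SOURCE B (Python) =====
-- def correctCapitalization(s: str) -> bool:
--     # valid iff every char is uppercase, or no char after the first is uppercase
--     return all(c.isupper() for c in s) or not any(c.isupper() for c in s[1:])
-- ===== Notes on version B (the rewrite author's own statement) =====
-- stated objective: simpler
-- what changed: Replaces the counter-and-flag loop plus the three-way count comparison with two direct boolean scans (all uppercase, or no uppercase after the first char) combined by OR.
import Mathlib
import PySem

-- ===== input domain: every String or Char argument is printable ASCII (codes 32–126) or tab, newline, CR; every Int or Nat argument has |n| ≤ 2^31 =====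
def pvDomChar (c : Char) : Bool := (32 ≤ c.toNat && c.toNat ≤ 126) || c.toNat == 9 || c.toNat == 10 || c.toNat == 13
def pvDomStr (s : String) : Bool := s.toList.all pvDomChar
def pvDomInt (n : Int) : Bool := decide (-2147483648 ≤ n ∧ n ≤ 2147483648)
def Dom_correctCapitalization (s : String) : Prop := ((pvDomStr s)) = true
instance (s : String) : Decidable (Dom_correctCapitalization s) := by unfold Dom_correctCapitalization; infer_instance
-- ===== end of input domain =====

-- B replaces A's counter-and-flag loop by two direct boolean scans combined by OR (simpler).

-- ===== PORT A =====
def correctCapitalization (s : String) : Bool :=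
  if s == "" then true
  else
    let cs := s.toList
    let firstLetter : Bool := PySem.Chars.isupper (PySem.List.pyGetD cs 0 ' ')
    let capCounter : Int := if firstLetter then 1 else 0
    let capCounter :=
      (PySem.List.pyRange 1 (cs.length : Int) 1).foldl
        (fun acc i => if PySem.Chars.isupper (PySem.List.pyGetD cs i ' ') then acc + 1 else acc)
        capCounter
    (capCounter == 1 && firstLetter) || capCounter == 0 || capCounter == (cs.length : Int)

-- ===== PORT B =====
def correctCapitalization_alt (s : String) : Bool :=
  (s.toList.all PySem.Chars.isupper)
    || !((PySem.List.slice s.toList (some 1) none).any PySem.Chars.isupper)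

-- ===== PRECONDITION & SPEC =====
def Spec_correctCapitalization (s : String) (out : Bool) : Prop := out = correctCapitalization_alt s
instance (s : String) (out : Bool) : Decidable (Spec_correctCapitalization s out) := by unfold Spec_correctCapitalization; infer_instance

-- ===== CLAIM (what is proved, stated in full; the proofs are below) =====
def Claim_equal_correctCapitalization : Prop := ∀ (s : String), Dom_correctCapitalization s → Spec_correctCapitalization s (correctCapitalization s)

-- ===== LEMMAS AND PROOFS =====
theorem pv_foldl_count (p : Char → Bool) (t : List Char) (init : Int) :
    t.foldl (fun acc c => if p c then acc + 1 else acc) init = init + (t.countP p : Int) := by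
  induction t generalizing init with
  | nil => simp
  | cons c t ih =>
    simp only [List.foldl_cons, List.countP_cons, ih]
    split <;> simp_all <;> ring

theorem pv_all_countP (p : Char → Bool) (t : List Char) :
    t.all p = decide (t.countP p = t.length) := by
  induction t with
  | nil => simp
  | cons c t ih =>
    have h := List.countP_le_length (p := p) (l := t)
    by_cases hc : p c <;>
      simp [hc, List.countP_cons, ih, List.all_cons, decide_eq_decide] <;> omega

theorem pv_any_countP (p : Char → Bool) (t : List Char) :
    t.any p = decide (t.countP p ≠ 0) := by
  induction t with
  | nil => simp
  | cons c t ih =>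
    by_cases hc : p c <;>
      simp [hc, List.countP_cons, ih, List.any_cons]

-- ===== VERDICT (by name: the statement is the Claim_ definition above) =====
theorem correctCapitalization_spec : Claim_equal_correctCapitalization := by
  intro s _
  unfold Spec_correctCapitalization correctCapitalization correctCapitalization_alt
  rcases h : s.toList with _ | ⟨c, t⟩
  · have : s = "" := String.toList_eq_nil_iff.mp h
    simp [this, PySem.List.slice]
  · have hne : ¬ (s == "") = true := by
      intro hb
      have : s = "" := by simpa using hb
      simp [this, String.toList] at h
    simp only [hne, if_false, Bool.false_eq_true, h]
    rw [PySem.List.foldl_pyRange_pyGetD' (c :: t) ' '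
        (fun acc c => if PySem.Chars.isupper c then acc + 1 else acc) _ (by norm_num)]
    simp only [Int.toNat_one, List.drop_succ_cons, List.drop_zero]
    rw [pv_foldl_count]
    rw [PySem.List.slice_from (c :: t) (a := 1) (by norm_num)]
    simp only [Int.toNat_one, List.drop_succ_cons, List.drop_zero,
      PySem.List.pyGetD_zero_cons]
    have hcle := List.countP_le_length (p := PySem.Chars.isupper) (l := t)
    by_cases hc : PySem.Chars.isupper c <;>
      · simp only [hc, if_true, if_false, pv_all_countP, pv_any_countP, List.all_cons,
          List.length_cons]
        rw [Bool.eq_iff_iff]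
        simp only [hc, Bool.or_eq_true, Bool.and_eq_true, beq_iff_eq, decide_eq_true_eq,
          Bool.not_eq_true', decide_eq_false_iff_not, ne_eq, not_not, Bool.true_and,
          Bool.false_and, Nat.cast_add, Nat.cast_one, false_and, and_true, true_and,
          Bool.false_eq_true, if_false, if_true, or_false, false_or, and_false]
        omega
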